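-- pv_equiv track=rewrite | github.com/renierr/wcag_checker | src/report.py | count_violations
-- ===== SOURCE A (Python) =====
-- def count_violations(results):
--     violations_count = 0
--     for result in results:
--         if 'violations' in result:
--             violations_count += len(result.get('violations', []))
--         else:
--             return len(results)  # Contrast-Mode
--     return violations_count  # Axe-Mode
-- ===== SOURCE B (Python) =====
-- def count_violations(results):
--     if all('violations' in r for r in results):
--         return sum(len(r.get('violations', [])) for r in results)
--     return len(results)
-- ===== Notes on version B (the rewrite author's own statement) =====
-- stated objective: simpler
-- what changed: Replaces the fused loop (membership test, running sum and early return interleaved) with two separate passes: an all() predicate check, then a sum over a generator, else len(results).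
import Mathlib
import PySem

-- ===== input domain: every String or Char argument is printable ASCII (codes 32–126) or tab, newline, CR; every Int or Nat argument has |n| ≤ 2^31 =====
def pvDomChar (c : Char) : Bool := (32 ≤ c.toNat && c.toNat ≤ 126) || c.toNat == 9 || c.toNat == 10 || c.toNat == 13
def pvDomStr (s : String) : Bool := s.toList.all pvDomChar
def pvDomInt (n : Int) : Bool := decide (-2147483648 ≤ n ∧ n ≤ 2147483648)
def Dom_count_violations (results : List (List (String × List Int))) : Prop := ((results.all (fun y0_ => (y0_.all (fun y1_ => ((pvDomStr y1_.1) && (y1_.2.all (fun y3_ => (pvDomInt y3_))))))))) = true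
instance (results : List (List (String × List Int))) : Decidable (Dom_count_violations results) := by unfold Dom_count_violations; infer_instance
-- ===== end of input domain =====

-- B replaces A's fused loop (membership test + running sum + early return) with two separate passes: all()-check then sum; same cost, simpler.


-- ===== PORT A =====
-- A: one fused loop: membership test, running sum, early return len(results).
def cvHasKey (r : List (String × List Int)) : Bool := r.any (fun p => p.1 == "violations")

def cvGetLen (r : List (String × List Int)) : Int :=
  match r.find? (fun p => p.1 == "violations") with
  | some p => (p.2.length : Int)
  | none => 0

def cvLoop (results : List (List (String × List Int))) :
    List (List (String × List Int)) → Int → Int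
  | [], acc => acc
  | r :: rest, acc =>
    if cvHasKey r then cvLoop results rest (acc + cvGetLen r)
    else (results.length : Int)

def count_violations (results : List (List (String × List Int))) : Int :=
  cvLoop results results 0

-- ===== PORT B =====
-- B: two passes — an all() predicate check, then a sum; else len(results).
def count_violations_alt (results : List (List (String × List Int))) : Int :=
  if results.all cvHasKey then (results.map cvGetLen).sum
  else (results.length : Int)

-- ===== PRECONDITION & SPEC =====
def Spec_count_violations (results : List (List (String × List Int))) (out : Int) : Prop := out = count_violations_alt results
instance (results : List (List (String × List Int))) (out : Int) : Decidable (Spec_count_violations results out) := by unfold Spec_count_violations; infer_instance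

-- ===== CLAIM (what is proved, stated in full; the proofs are below) =====
def Claim_equal_count_violations : Prop := ∀ (results : List (List (String × List Int))), Dom_count_violations results → Spec_count_violations results (count_violations results)

-- ===== LEMMAS AND PROOFS =====

-- ===== VERDICT (by name: the statement is the Claim_ definition above) =====
lemma cvLoop_eq (all : List (List (String × List Int))) :
    ∀ (rs : List (List (String × List Int))) (acc : Int),
    cvLoop all rs acc =
      if rs.all cvHasKey then acc + (rs.map cvGetLen).sum else (all.length : Int)
  | [], acc => by simp [cvLoop]
  | r :: rest, acc => by
    simp only [cvLoop, List.all_cons, List.map_cons, List.sum_cons]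
    by_cases h : cvHasKey r
    · simp [h, cvLoop_eq all rest (acc + cvGetLen r)]
      split_ifs <;> ring
    · simp [h]

theorem count_violations_spec : Claim_equal_count_violations := by
  intro results _
  unfold Spec_count_violations count_violations count_violations_alt
  rw [cvLoop_eq]
  split_ifs <;> simp
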